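-- pv_equiv track=rewrite | github.com/Zynton/xpmaker | xpmaker.py | xp_mix_and_match
-- ===== SOURCE A (Python) =====
-- def xp_mix_and_match(notes, rhythms):
-- 	note = (notes[0], rhythms[0])
-- 	xp = [note]
-- 	notes_i = 0
-- 	rhythms_i = 0
-- 	while True:
-- 		notes_i = (notes_i + 1) % len(notes)
-- 		rhythms_i = (rhythms_i + 1) % len(rhythms)
-- 		note = (notes[notes_i], rhythms[rhythms_i])
-- 		if notes_i is 0 and rhythms_i is 0: break
-- 		xp.append(note)
-- 	return xp
-- ===== SOURCE B (Python) =====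
-- def xp_mix_and_match(notes, rhythms):
-- 	n = len(notes)
-- 	r = len(rhythms)
-- 	a, b = n, r
-- 	while b:
-- 		a, b = b, a % b
-- 	length = n * r // a
-- 	return [(notes[i % n], rhythms[i % r]) for i in range(length)]
-- ===== Notes on version B (the rewrite author's own statement) =====
-- stated objective: simpler
-- what changed: B computes the output length in closed form as len(notes)*len(rhythms)//gcd and builds the list with a single indexed comprehension, replacing A's while-loop with two cyclic counters and a dynamic both-back-to-zero termination test.
import Mathlib
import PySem

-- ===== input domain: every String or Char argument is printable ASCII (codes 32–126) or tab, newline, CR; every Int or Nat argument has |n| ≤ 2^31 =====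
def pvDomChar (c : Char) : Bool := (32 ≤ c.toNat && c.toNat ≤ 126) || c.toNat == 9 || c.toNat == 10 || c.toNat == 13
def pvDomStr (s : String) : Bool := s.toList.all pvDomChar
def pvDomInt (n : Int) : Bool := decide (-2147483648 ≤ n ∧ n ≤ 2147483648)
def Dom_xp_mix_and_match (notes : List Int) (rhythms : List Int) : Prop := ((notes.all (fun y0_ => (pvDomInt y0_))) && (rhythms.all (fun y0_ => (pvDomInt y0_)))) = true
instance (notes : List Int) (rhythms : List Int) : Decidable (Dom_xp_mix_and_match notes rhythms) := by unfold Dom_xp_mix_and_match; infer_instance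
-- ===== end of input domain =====

-- B replaces A's dual-counter while-loop by the closed-form length n*r//gcd and one indexed
-- comprehension (objective: simpler). Return-value equivalence on nonempty inputs.

-- ===== PORT A =====
-- A's 'while True' loop as structural recursion on fuel notes.length*rhythms.length
-- (an upper bound on the iteration count lcm-1; under Pre_ the loop always breaks first,
-- proved below). Indices produced by '% len' are in range under Pre_, so getD is Python's subscript.
def xpLoopA (notes rhythms : List Int) : Nat → Nat → Nat → List (Int × Int) → List (Int × Int)
  | 0, _, _, xp => xp
  | fuel + 1, notes_i, rhythms_i, xp =>
    if (notes_i + 1) % notes.length = 0 ∧ (rhythms_i + 1) % rhythms.length = 0 then xp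
    else xpLoopA notes rhythms fuel ((notes_i + 1) % notes.length) ((rhythms_i + 1) % rhythms.length)
      (xp ++ [(notes.getD ((notes_i + 1) % notes.length) 0,
               rhythms.getD ((rhythms_i + 1) % rhythms.length) 0)])

def xp_mix_and_match (notes : List Int) (rhythms : List Int) : List (Int × Int) :=
  xpLoopA notes rhythms (notes.length * rhythms.length) 0 0
    [(notes.getD 0 0, rhythms.getD 0 0)]

-- ===== PORT B =====
-- Source B's hand-written Euclid while-loop, as structural recursion on fuel b+1 (the second
-- argument strictly decreases, so b+1 steps always suffice; proved below)
def pvGcdLoop : Nat → Nat → Nat → Nat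
  | 0, a, _ => a
  | fuel + 1, a, b => if b = 0 then a else pvGcdLoop fuel b (a % b)

def pvGcdB (a b : Nat) : Nat := pvGcdLoop (b + 1) a b

def xp_mix_and_match_alt (notes : List Int) (rhythms : List Int) : List (Int × Int) :=
  let n := notes.length
  let r := rhythms.length
  let a := pvGcdB n r
  let length := n * r / a
  (List.range length).map (fun i => (notes.getD (i % n) 0, rhythms.getD (i % r) 0))

-- ===== PRECONDITION & SPEC =====
-- Pre_ excludes exactly the inputs on which Python A raises (IndexError on an empty list).
def Pre_xp_mix_and_match (notes : List Int) (rhythms : List Int) : Prop :=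
  notes ≠ [] ∧ rhythms ≠ []
instance (notes : List Int) (rhythms : List Int) : Decidable (Pre_xp_mix_and_match notes rhythms) := by unfold Pre_xp_mix_and_match; infer_instance

def pvWitness_xp_mix_and_match : List Int × List Int := ([1, 2], [3, 4, 5])

def Spec_xp_mix_and_match (notes : List Int) (rhythms : List Int) (out : List (Int × Int)) : Prop := out = xp_mix_and_match_alt notes rhythms
instance (notes : List Int) (rhythms : List Int) (out : List (Int × Int)) : Decidable (Spec_xp_mix_and_match notes rhythms out) := by unfold Spec_xp_mix_and_match; infer_instance

-- ===== CLAIM (what is proved, stated in full; the proofs are below) =====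
def Claim_equal_xp_mix_and_match : Prop := ∀ (notes : List Int) (rhythms : List Int), Dom_xp_mix_and_match notes rhythms → Pre_xp_mix_and_match notes rhythms → Spec_xp_mix_and_match notes rhythms (xp_mix_and_match notes rhythms)
-- ===== LEMMAS AND PROOFS =====

theorem pvGcdLoop_eq (fuel : Nat) : ∀ a b : Nat, b < fuel → pvGcdLoop fuel a b = Nat.gcd a b := by
  induction fuel with
  | zero => intro a b h; omega
  | succ fuel ih =>
    intro a b h
    rw [pvGcdLoop]
    by_cases hb : b = 0
    · simp [hb]
    · rw [if_neg hb, ih b (a % b) (by have := Nat.mod_lt a (Nat.pos_of_ne_zero hb); omega)]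
      calc Nat.gcd b (a % b) = Nat.gcd (a % b) b := Nat.gcd_comm _ _
        _ = Nat.gcd b a := (Nat.gcd_rec b a).symm
        _ = Nat.gcd a b := Nat.gcd_comm _ _

theorem pvGcdB_eq (a b : Nat) : pvGcdB a b = Nat.gcd a b :=
  pvGcdLoop_eq (b + 1) a b (Nat.lt_succ_self b)

-- loop characterisation: starting at step i (counters i % n, i % r), with enough fuel,
-- the loop appends exactly the pairs for steps i+1 .. lcm-1
theorem xpLoopA_eq (notes rhythms : List Int) (hn : notes ≠ []) (hr : rhythms ≠ [])
    (fuel : Nat) :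
    ∀ (i : Nat) (xp : List (Int × Int)),
      i < Nat.lcm notes.length rhythms.length →
      Nat.lcm notes.length rhythms.length - 1 - i ≤ fuel →
      xpLoopA notes rhythms fuel (i % notes.length) (i % rhythms.length) xp =
        xp ++ (List.range' (i + 1) (Nat.lcm notes.length rhythms.length - (i + 1))).map
          (fun j => (notes.getD (j % notes.length) 0, rhythms.getD (j % rhythms.length) 0)) := by
  have hn0 : 0 < notes.length := List.length_pos_iff.mpr hn
  have hr0 : 0 < rhythms.length := List.length_pos_iff.mpr hr
  set L := Nat.lcm notes.length rhythms.length with hL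
  induction fuel with
  | zero =>
    intro i xp hi hf
    have : i = L - 1 := by omega
    subst this
    have h0 : L - (L - 1 + 1) = 0 := by omega
    simp [xpLoopA, h0]
  | succ fuel ih =>
    intro i xp hi hf
    rw [xpLoopA]
    simp only [Nat.mod_add_mod]
    by_cases hbreak : (i + 1) % notes.length = 0 ∧ (i + 1) % rhythms.length = 0
    · -- both counters at 0: L ∣ i+1, and i+1 ≤ L so i+1 = L
      have hdvd : L ∣ (i + 1) := Nat.lcm_dvd (Nat.dvd_of_mod_eq_zero hbreak.1)
        (Nat.dvd_of_mod_eq_zero hbreak.2)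
      have hle : L ≤ i + 1 := Nat.le_of_dvd (Nat.succ_pos i) hdvd
      have heq : i + 1 = L := by omega
      rw [if_pos hbreak]
      have h0 : L - (i + 1) = 0 := by omega
      simp [h0]
    · rw [if_neg hbreak]
      have hlt : i + 1 < L := by
        rcases Nat.lt_or_ge (i + 1) L with h | h
        · exact h
        · exfalso
          apply hbreak
          have hiL : i + 1 = L := by omega
          rw [hiL]
          exact ⟨Nat.mod_eq_zero_of_dvd (Nat.dvd_lcm_left _ _),
            Nat.mod_eq_zero_of_dvd (Nat.dvd_lcm_right _ _)⟩
      have hrec := ih (i + 1) (xp ++ [(notes.getD ((i + 1) % notes.length) 0,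
                                  rhythms.getD ((i + 1) % rhythms.length) 0)]) hlt (by omega)
      rw [hrec, List.append_assoc]
      congr 1
      have hrange : List.range' (i + 1) (L - (i + 1)) =
          (i + 1) :: List.range' (i + 2) (L - (i + 2)) := by
        have h1 : L - (i + 1) = (L - (i + 2)) + 1 := by omega
        rw [h1, List.range'_succ]
      rw [hrange]
      simp

-- ===== VERDICT (by name: the statement is the Claim_ definition above) =====
theorem xp_mix_and_match_spec : Claim_equal_xp_mix_and_match := by
  intro notes rhythms _ hpre
  obtain ⟨hn, hr⟩ := hpre
  have hn0 : 0 < notes.length := List.length_pos_iff.mpr hn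
  have hr0 : 0 < rhythms.length := List.length_pos_iff.mpr hr
  unfold Spec_xp_mix_and_match xp_mix_and_match xp_mix_and_match_alt
  simp only [pvGcdB_eq]
  have hlen : notes.length * rhythms.length / Nat.gcd notes.length rhythms.length =
      Nat.lcm notes.length rhythms.length := rfl
  rw [hlen]
  set L := Nat.lcm notes.length rhythms.length with hL
  have hLpos : 0 < L := Nat.pos_of_ne_zero (Nat.lcm_ne_zero (by omega) (by omega))
  have hLle : L ≤ notes.length * rhythms.length :=
    Nat.le_of_dvd (by positivity)
      (Nat.lcm_dvd ⟨rhythms.length, rfl⟩ ⟨notes.length, Nat.mul_comm _ _⟩)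
  have hmain := xpLoopA_eq notes rhythms hn hr (notes.length * rhythms.length) 0
    [(notes.getD 0 0, rhythms.getD 0 0)] hLpos (by omega)
  rw [Nat.zero_mod, Nat.zero_mod] at hmain
  rw [hmain]
  have hrange : List.range L = 0 :: List.range' 1 (L - 1) := by
    rw [List.range_eq_range']
    have h1 : L = (L - 1) + 1 := by omega
    rw [h1, List.range'_succ]
    simp
  rw [hrange]
  simp [← hL]
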